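-- pv_equiv track=rewrite | github.com/EduardoXavier16/PDF-Translator | app/services/jobs.py | _normalize_long_tokens
-- ===== SOURCE A (Python) =====
-- from typing import Dict, List, Optional
--
-- def _normalize_long_tokens(text: str) -> str:
--     cleaned_lines: List[str] = []
--     for raw_line in text.splitlines():
--         tokens = raw_line.split(" ")
--         normalized_tokens: List[str] = []
--         for token in tokens:
--             if len(token) > 80:
--                 parts: List[str] = []
--                 start_index = 0
--                 while start_index < len(token):
--                     end_index = start_index + 40
--                     parts.append(token[start_index:end_index])
--                     start_index = end_index
--                 normalized_tokens.append(" ".join(parts))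
--             else:
--                 normalized_tokens.append(token)
--         cleaned_lines.append(" ".join(normalized_tokens))
--     return "\n".join(cleaned_lines)
-- ===== SOURCE B (Python) =====
-- def _flush(run) -> str:
--     t = "".join(run)
--     if len(t) > 80:
--         return " ".join(t[j:j + 40] for j in range(0, len(t), 40))
--     return t
--
--
-- def _normalize_long_tokens(text: str) -> str:
--     # single left-to-right scan; no per-line token lists are built
--     out = []
--     run = []
--     i = 0
--     n = len(text)
--     while i < n:
--         c = text[i]
--         if c == " ":
--             out.append(_flush(run))
--             out.append(" ")
--             run = []
--             i += 1
--         elif c == "\n" or c == "\r":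
--             out.append(_flush(run))
--             run = []
--             i += 2 if c == "\r" and i + 1 < n and text[i + 1] == "\n" else 1
--             if i < n:
--                 out.append("\n")
--         else:
--             run.append(c)
--             i += 1
--     out.append(_flush(run))
--     return "".join(out)
-- ===== Notes on version B (the rewrite author's own statement) =====
-- stated objective: alternative
-- what changed: A splits the text into lines, splits each line into a token list, tests and rewrites each token and re-joins twice; B makes a single left-to-right character scan over the whole string, flushing the pending non-space run (chunked into 40-char pieces when longer than 80) at each space or line break, so no per-line token lists are built.
import Mathlib
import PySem

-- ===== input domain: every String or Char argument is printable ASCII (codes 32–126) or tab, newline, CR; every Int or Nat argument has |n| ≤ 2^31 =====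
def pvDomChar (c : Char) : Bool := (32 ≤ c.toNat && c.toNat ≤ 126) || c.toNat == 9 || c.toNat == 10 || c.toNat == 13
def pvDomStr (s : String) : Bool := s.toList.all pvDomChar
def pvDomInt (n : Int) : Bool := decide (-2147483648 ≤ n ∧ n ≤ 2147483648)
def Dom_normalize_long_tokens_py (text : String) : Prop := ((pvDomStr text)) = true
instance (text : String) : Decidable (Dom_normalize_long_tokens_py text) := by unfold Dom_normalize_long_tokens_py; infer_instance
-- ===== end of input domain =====

-- B replaces A's split-into-lines / split-into-tokens / re-join pipeline with a single
-- left-to-right character scan over the whole string (alternative structure, no speed claim).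


-- ===== PORT A =====
-- while start_index < len(token): parts.append(token[start_index:end_index]); start_index = end_index
-- (start_index stays a non-negative int in A, so it is carried as a Nat and cast into the slice)
def pvChunkA (token : List Char) (start : Nat) : List (List Char) :=
  if start < token.length then
    PySem.Chars.slice token (some (start : Int)) (some ((start : Int) + 40)) :: pvChunkA token (start + 40)
  else []
termination_by token.length - start

-- the body of A's inner for-loop: one token
def pvNormTokA (token : List Char) : List Char :=
  if token.length > 80 then PySem.Chars.join [' '] (pvChunkA token 0) else token

-- one raw_line: tokens = raw_line.split(" ") (sep nonempty, so split? = some ∘ splitOn); " ".join(...)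
def pvLineA (line : List Char) : List Char :=
  PySem.Chars.join [' '] ((PySem.Chars.splitOn line [' ']).map pvNormTokA)

def normalize_long_tokens_py (text : String) : String :=
  String.ofList (PySem.Chars.join ['\n'] ((PySem.Chars.splitlines text.toList).map pvLineA))

-- ===== PORT B =====
-- _flush: " ".join(t[j:j+40] for j in range(0, len(t), 40)) when len(t) > 80, else t
def pvFlushB (run : List Char) : List Char :=
  if run.length > 80 then
    PySem.Chars.join [' ']
      ((PySem.List.pyRange 0 (run.length : Int) 40).map
        (fun j => PySem.Chars.slice run (some j) (some (j + 40))))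
  else run

-- the single scan of B: `run` is the pending non-space run, the rest of the text is the second argument
def pvScanB (run : List Char) : List Char → List Char
  | [] => pvFlushB run
  | c :: rest =>
    if c = ' ' then pvFlushB run ++ ' ' :: pvScanB [] rest
    else if c = '\n' then
      pvFlushB run ++ (if rest.isEmpty then [] else '\n' :: pvScanB [] rest)
    else if c = '\r' then
      match rest with
      | '\n' :: rest2 => pvFlushB run ++ (if rest2.isEmpty then [] else '\n' :: pvScanB [] rest2)
      | r => pvFlushB run ++ (if r.isEmpty then [] else '\n' :: pvScanB [] r)
    else pvScanB (run ++ [c]) rest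
termination_by l => l.length
decreasing_by all_goals (simp_all; try omega)

def normalize_long_tokens_py_alt (text : String) : String :=
  String.ofList (pvScanB [] text.toList)

-- ===== PRECONDITION & SPEC =====
def Spec_normalize_long_tokens_py (text : String) (out : String) : Prop := out = normalize_long_tokens_py_alt text
instance (text : String) (out : String) : Decidable (Spec_normalize_long_tokens_py text out) := by unfold Spec_normalize_long_tokens_py; infer_instance

-- ===== CLAIM (what is proved, stated in full; the proofs are below) =====
def Claim_equal_normalize_long_tokens_py : Prop := ∀ (text : String), Dom_normalize_long_tokens_py text → Spec_normalize_long_tokens_py text (normalize_long_tokens_py text)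

-- ===== LEMMAS AND PROOFS =====

-- Python's splitlines break predicate, as in PySem.Chars.splitlines
def pvIsB (c : Char) : Bool :=
  decide (c.toNat = 10) || decide (c.toNat = 13) || decide (c.toNat = 11) || decide (c.toNat = 12) ||
    decide (c.toNat = 28) || decide (c.toNat = 29) || decide (c.toNat = 30) || decide (c.toNat = 133) ||
    decide (c.toNat = 8232) || decide (c.toNat = 8233)

-- accumulator-free form of PySem.Chars.splitlines.go
def pvSlAux (isB : Char → Bool) : List Char → List Char → List (List Char)
  | [], cur => if cur.isEmpty then [] else [cur.reverse]
  | '\r' :: '\n' :: rest, cur => cur.reverse :: pvSlAux isB rest []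
  | c :: rest, cur => if isB c then cur.reverse :: pvSlAux isB rest [] else pvSlAux isB rest (c :: cur)

-- accumulator-free form of PySem.Chars.splitOn.go for the one-char separator " "
def pvSpAux : List Char → List Char → List (List Char)
  | [], cur => [cur.reverse]
  | c :: rest, cur => if c = ' ' then cur.reverse :: pvSpAux rest [] else pvSpAux rest (c :: cur)

-- a "good" char can sit inside a token: in Dom and none of ' ', '\n', '\r'
def pvGood (c : Char) : Bool := pvDomChar c && !(c == ' ') && !(c == '\n') && !(c == '\r')

lemma pv_char_eq_iff (a b : Char) : a = b ↔ a.toNat = b.toNat := eq_iff_eq_of_cmp_eq_cmp rfl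

lemma pvIsB_of_good {c : Char} (h : pvGood c = true) : pvIsB c = false := by
  simp only [pvGood, Bool.and_eq_true, Bool.not_eq_true', beq_eq_false_iff_ne, ne_eq,
    pv_char_eq_iff, pvDomChar, Bool.or_eq_true, decide_eq_true_eq, beq_iff_eq,
    show '\n'.toNat = 10 from rfl, show '\r'.toNat = 13 from rfl,
    show ' '.toNat = 32 from rfl] at h
  simp only [pvIsB, Bool.or_eq_false_iff, decide_eq_false_iff_not]
  omega

lemma pv_splitlines_go_eq (isB : Char → Bool) (s cur : List Char) (acc : List (List Char)) :
    PySem.Chars.splitlines.go isB s cur acc = acc.reverse ++ pvSlAux isB s cur := by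
  fun_induction pvSlAux isB s cur generalizing acc
  all_goals simp_all [PySem.Chars.splitlines.go]

lemma pv_splitlines_eq (s : List Char) :
    PySem.Chars.splitlines s = pvSlAux pvIsB s [] := by
  have h := pv_splitlines_go_eq pvIsB s [] []
  simpa using h

lemma pv_splitOn_go_eq (fuel : Nat) (l cur : List Char) (acc : List (List Char))
    (h : l.length ≤ fuel) :
    PySem.Chars.splitOn.go [' '] fuel l cur acc = acc.reverse ++ pvSpAux l cur := by
  induction fuel generalizing l cur acc with
  | zero =>
    have hl : l = [] := by cases l <;> simp_all
    subst hl; simp [PySem.Chars.splitOn.go, pvSpAux]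
  | succ f ih =>
    cases l with
    | nil => simp [PySem.Chars.splitOn.go, pvSpAux]
    | cons c rest =>
      by_cases hc : c = ' '
      · subst hc
        simp only [PySem.Chars.splitOn.go, List.isPrefixOf, BEq.rfl, Bool.true_and,
          if_pos, List.drop_succ_cons, List.length_cons]
        rw [ih _ _ _ (by simpa using Nat.le_of_succ_le_succ h)]
        simp [pvSpAux]
      · simp only [PySem.Chars.splitOn.go, List.isPrefixOf, Bool.and_true]
        rw [if_neg (by simp; exact fun h' => hc h'.symm)]
        rw [ih _ _ _ (by simpa using Nat.le_of_succ_le_succ h)]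
        simp [pvSpAux, hc]

lemma pv_splitOn_eq (l : List Char) : PySem.Chars.splitOn l [' '] = pvSpAux l [] := by
  have h := pv_splitOn_go_eq (l.length + 1) l [] [] (by omega)
  simpa [PySem.Chars.splitOn] using h

lemma pvSpAux_noSpace {p : List Char} (hp : ∀ c ∈ p, ¬ c = ' ') (cur : List Char) :
    pvSpAux p cur = [cur.reverse ++ p] := by
  induction p generalizing cur with
  | nil => simp [pvSpAux]
  | cons c p ih =>
    have hc : ¬ c = ' ' := hp c (by simp)
    rw [pvSpAux, if_neg hc, ih (fun d hd => hp d (by simp [hd]))]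
    simp

lemma pvSpAux_split {p : List Char} (hp : ∀ c ∈ p, ¬ c = ' ') (rest cur : List Char) :
    pvSpAux (p ++ ' ' :: rest) cur = (cur.reverse ++ p) :: pvSpAux rest [] := by
  induction p generalizing cur with
  | nil => simp [pvSpAux]
  | cons c p ih =>
    have hc : ¬ c = ' ' := hp c (by simp)
    rw [List.cons_append, pvSpAux, if_neg hc, ih (fun d hd => hp d (by simp [hd]))]
    simp

lemma pvSpAux_ne_nil (l cur : List Char) : pvSpAux l cur ≠ [] := by
  fun_induction pvSpAux l cur <;> simp_all

lemma pvSlAux_prefix {p : List Char} (hp : ∀ c ∈ p, pvIsB c = false) (rest cur : List Char) :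
    pvSlAux pvIsB (p ++ rest) cur = pvSlAux pvIsB rest (p.reverse ++ cur) := by
  induction p generalizing cur with
  | nil => simp
  | cons c p ih =>
    have hc : pvIsB c = false := hp c (by simp)
    have hcr : ∀ (r : List Char), c = '\r' → p ++ rest = '\n' :: r → False := by
      rintro r rfl -; exact absurd hc (by decide)
    rw [List.cons_append, pvSlAux.eq_3 _ _ _ _ hcr, if_neg (by simp [hc]),
      ih (fun d hd => hp d (by simp [hd]))]
    simp

lemma pvSlAux_noBrk {p : List Char} (hp : ∀ c ∈ p, pvIsB c = false) (cur : List Char) :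
    pvSlAux pvIsB p cur = if cur.isEmpty && p.isEmpty then [] else [cur.reverse ++ p] := by
  induction p generalizing cur with
  | nil => cases cur <;> simp [pvSlAux]
  | cons c p ih =>
    have hc : pvIsB c = false := hp c (by simp)
    have hcr : ∀ (r : List Char), c = '\r' → p = '\n' :: r → False := by
      rintro r rfl -; exact absurd hc (by decide)
    rw [pvSlAux.eq_3 _ _ _ _ hcr, if_neg (by simp [hc]),
      ih (fun d hd => hp d (by simp [hd]))]
    simp

lemma pvSlAux_ne_nil (l cur : List Char) (h : ¬ (cur = [] ∧ l = [])) : pvSlAux pvIsB l cur ≠ [] := by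
  revert h
  fun_induction pvSlAux pvIsB l cur <;> simp_all

lemma pvRange40_nil {a b : Int} (h : ¬ a < b) : PySem.List.pyRange a b 40 = [] := by
  rw [PySem.List.pyRange_of_pos a b (by norm_num)]
  simp [h]

lemma pvRange40_cons {a b : Int} (h : a < b) :
    PySem.List.pyRange a b 40 = a :: PySem.List.pyRange (a + 40) b 40 := by
  rw [PySem.List.pyRange_of_pos a b (by norm_num),
    PySem.List.pyRange_of_pos (a + 40) b (by norm_num), if_pos h]
  by_cases h2 : a + 40 < b
  · rw [if_pos h2]
    have hn : ((b - a + 40 - 1) / 40).toNat = ((b - (a + 40) + 40 - 1) / 40).toNat + 1 := by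
      omega
    rw [hn, List.range_succ_eq_map, List.map_cons, List.map_map]
    refine congrArg₂ _ (by ring) (List.map_congr_left ?_)
    intro k _
    simp only [Function.comp]
    push_cast
    ring
  · rw [if_neg h2]
    have hn : ((b - a + 40 - 1) / 40).toNat = 1 := by omega
    rw [hn]
    simp

-- one char-level chunking: A's while-loop equals B's range comprehension
lemma pv_chunk_eq (tok : List Char) (s : Nat) :
    pvChunkA tok s =
      (PySem.List.pyRange (s : Int) (tok.length : Int) 40).map
        (fun j => PySem.Chars.slice tok (some j) (some (j + 40))) := by
  rw [pvChunkA]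
  by_cases hs : s < tok.length
  · rw [if_pos hs, pvRange40_cons (a := (s : Int)) (b := (tok.length : Int)) (by exact_mod_cast hs),
      List.map_cons, pv_chunk_eq tok (s + 40)]
    push_cast
    simp
  · rw [if_neg hs, pvRange40_nil (by exact_mod_cast hs)]
    simp
termination_by tok.length - s
decreasing_by omega

lemma pv_normTok_eq_flush (tok : List Char) : pvNormTokA tok = pvFlushB tok := by
  rw [pvNormTokA, pvFlushB]
  split
  · rw [pv_chunk_eq]
    norm_num
  · rfl

lemma pv_join_cons (x : List Char) (xs : List (List Char)) :
    PySem.Chars.join ['\n'] (x :: xs) = x ++ (if xs = [] then [] else '\n' :: PySem.Chars.join ['\n'] xs) := by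
  cases xs with
  | nil => simp [PySem.Chars.join_singleton]
  | cons y ys => rw [PySem.Chars.join_cons_cons]; simp

-- A's whole pipeline through the accumulator-free splitlines
def pvA (cs : List Char) : List Char :=
  PySem.Chars.join ['\n'] ((pvSlAux pvIsB cs []).map pvLineA)

lemma pv_lineA_noSpace {p : List Char} (hp : ∀ c ∈ p, ¬ c = ' ') : pvLineA p = pvNormTokA p := by
  rw [pvLineA, pv_splitOn_eq, pvSpAux_noSpace hp]
  simp [PySem.Chars.join_singleton]

lemma pv_lineA_split {p : List Char} (hp : ∀ c ∈ p, ¬ c = ' ') (rest : List Char) :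
    pvLineA (p ++ ' ' :: rest) = pvNormTokA p ++ ' ' :: pvLineA rest := by
  rw [pvLineA, pv_splitOn_eq, pvSpAux_split hp, List.map_cons]
  cases hE : (pvSpAux rest []).map pvNormTokA with
  | nil => exact absurd (List.map_eq_nil_iff.mp hE) (pvSpAux_ne_nil rest [])
  | cons L Ls =>
    rw [PySem.Chars.join_cons_cons, pvLineA, pv_splitOn_eq, hE]
    simp

lemma pv_good_noSpace {p : List Char} (hp : ∀ c ∈ p, pvGood c = true) : ∀ c ∈ p, ¬ c = ' ' := by
  intro c hc
  have := hp c hc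
  simp only [pvGood, Bool.and_eq_true, Bool.not_eq_true', beq_eq_false_iff_ne, ne_eq] at this
  exact this.1.1.2

lemma pv_good_noBrk {p : List Char} (hp : ∀ c ∈ p, pvGood c = true) : ∀ c ∈ p, pvIsB c = false := by
  intro c hc
  exact pvIsB_of_good (hp c hc)

lemma pvA_atom {p : List Char} (hp : ∀ c ∈ p, pvGood c = true) : pvA p = pvFlushB p := by
  rw [pvA, pvSlAux_noBrk (pv_good_noBrk hp)]
  cases p with
  | nil => simp [PySem.Chars.join_nil, pvFlushB]
  | cons c q =>
    simp only [List.isEmpty_nil, List.isEmpty_cons, Bool.and_false, Bool.false_eq_true,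
      if_false, List.reverse_nil, List.nil_append, List.map_cons, List.map_nil]
    rw [PySem.Chars.join_singleton, pv_lineA_noSpace (pv_good_noSpace hp), pv_normTok_eq_flush]

lemma pvSlAux_cur : ∀ (n : Nat) (l cur : List Char), l.length ≤ n →
    pvSlAux pvIsB l cur =
      (match pvSlAux pvIsB l [] with
        | [] => if cur.isEmpty then [] else [cur.reverse]
        | L :: Ls => (cur.reverse ++ L) :: Ls) := by
  intro n
  induction n with
  | zero =>
    intro l cur h
    have hl : l = [] := by cases l <;> simp_all
    subst hl; simp [pvSlAux]
  | succ n ih =>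
    intro l cur h
    cases l with
    | nil => simp [pvSlAux]
    | cons c rest =>
      by_cases hx : c = '\r' ∧ ∃ r2, rest = '\n' :: r2
      · obtain ⟨rfl, r2, rfl⟩ := hx
        rw [pvSlAux.eq_2, pvSlAux.eq_2]
        simp
      · have hcond : ∀ (r : List Char), c = '\r' → rest = '\n' :: r → False := by
          intro r h1 h2; exact hx ⟨h1, r, h2⟩
        rw [pvSlAux.eq_3 _ _ _ _ hcond, pvSlAux.eq_3 _ _ _ _ hcond]
        by_cases hb : pvIsB c = true
        · simp [hb]
        · rw [if_neg hb, if_neg hb,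
            ih rest (c :: cur) (by simp at h; omega),
            ih rest [c] (by simp at h; omega)]
          cases pvSlAux pvIsB rest [] <;> simp


lemma pvA_space {p : List Char} (hp : ∀ c ∈ p, pvGood c = true) (rest : List Char) :
    pvA (p ++ ' ' :: rest) = pvFlushB p ++ ' ' :: pvA rest := by
  have h1 : pvSlAux pvIsB (p ++ ' ' :: rest) [] = pvSlAux pvIsB rest (' ' :: p.reverse) := by
    rw [pvSlAux_prefix (pv_good_noBrk hp), pvSlAux.eq_3 _ _ _ _ (fun r h _ => absurd h (by decide)),
      if_neg (by decide)]
    simp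
  rw [pvA, h1, pvSlAux_cur rest.length rest (' ' :: p.reverse) le_rfl]
  cases hE : pvSlAux pvIsB rest [] with
  | nil =>
    have hrest : rest = [] := by
      by_contra hne
      exact pvSlAux_ne_nil rest [] (by simp [hne]) hE
    subst hrest
    simp only [List.isEmpty_cons, Bool.false_eq_true, if_false, List.map_cons, List.map_nil,
      List.reverse_cons, List.reverse_reverse]
    rw [PySem.Chars.join_singleton, pv_lineA_split (pv_good_noSpace hp), pv_normTok_eq_flush]
    have : pvLineA [] = [] := by
      rw [pvLineA, pv_splitOn_eq]
      simp [pvSpAux, PySem.Chars.join_singleton, pvNormTokA]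
    rw [this, pvA, hE]
    simp [PySem.Chars.join_nil]
  | cons L Ls =>
    simp only [List.reverse_cons, List.reverse_reverse, List.map_cons]
    rw [List.append_assoc, List.singleton_append, pv_join_cons,
      pv_lineA_split (pv_good_noSpace hp), pv_normTok_eq_flush,
      pvA, hE, List.map_cons, pv_join_cons]
    simp

lemma pvA_break {p : List Char} (hp : ∀ c ∈ p, pvGood c = true) (brk rest : List Char)
    (hbrk : brk = ['\n'] ∨ brk = ['\r', '\n'] ∨ (brk = ['\r'] ∧ ∀ r, rest ≠ '\n' :: r)) :
    pvA (p ++ brk ++ rest) = pvFlushB p ++ (if rest = [] then [] else '\n' :: pvA rest) := by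
  have h1 : pvSlAux pvIsB (p ++ brk ++ rest) [] = p :: pvSlAux pvIsB rest [] := by
    rw [List.append_assoc, pvSlAux_prefix (pv_good_noBrk hp)]
    rcases hbrk with rfl | rfl | ⟨rfl, hr⟩
    · rw [List.cons_append, List.nil_append, pvSlAux.eq_3 _ _ _ _ (fun r h _ => absurd h (by decide)),
        if_pos (by decide)]
      simp
    · rw [List.cons_append, List.cons_append, List.nil_append, pvSlAux.eq_2]
      simp
    · rw [List.cons_append, List.nil_append,
        pvSlAux.eq_3 _ _ _ _ (fun r _ h2 => hr r h2), if_pos (by decide)]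
      simp
  rw [pvA, h1, List.map_cons, pv_join_cons, pv_lineA_noSpace (pv_good_noSpace hp),
    pv_normTok_eq_flush, pvA]
  congr 1
  by_cases hrest : rest = []
  · subst hrest; simp [pvSlAux]
  · rw [if_neg hrest, if_neg (by simp [pvSlAux_ne_nil rest [] (by simp [hrest])])]

lemma pv_scanB_eq (run cs : List Char) (hrun : ∀ c ∈ run, pvGood c = true)
    (hcs : cs.all pvDomChar = true) : pvScanB run cs = pvA (run ++ cs) := by
  revert hrun hcs
  fun_induction pvScanB run cs with
  | case1 run =>
    intro hrun _
    rw [List.append_nil, pvA_atom hrun]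
  | case2 run rest ih =>
    intro hrun hcs
    rw [pvA_space hrun, ih (by simp) (by simp_all)]
    simp
  | case3 run rest h ih =>
    intro hrun hcs
    rw [show run ++ '\n' :: rest = run ++ ['\n'] ++ rest by simp,
      pvA_break hrun ['\n'] rest (Or.inl rfl)]
    by_cases hr : rest = []
    · subst hr; simp
    · have hie : rest.isEmpty = false := by simp [hr]
      simp only [hie, Bool.false_eq_true, if_false, if_neg hr]
      rw [ih (by simp) (by simp_all)]
      simp
  | case4 run rest2 h1 h2 ih =>
    intro hrun hcs
    rw [show run ++ '\r' :: '\n' :: rest2 = run ++ ['\r', '\n'] ++ rest2 by simp,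
      pvA_break hrun ['\r', '\n'] rest2 (Or.inr (Or.inl rfl))]
    by_cases hr : rest2 = []
    · subst hr; simp
    · have hie : rest2.isEmpty = false := by simp [hr]
      simp only [hie, Bool.false_eq_true, if_false, if_neg hr]
      rw [ih (by simp) (by simp_all)]
      simp
  | case5 run r hx h1 h2 ih =>
    intro hrun hcs
    rw [show run ++ '\r' :: r = run ++ ['\r'] ++ r by simp,
      pvA_break hrun ['\r'] r (Or.inr (Or.inr ⟨rfl, fun r2 h => hx r2 h⟩))]
    by_cases hr : r = []
    · subst hr; simp
    · have hie : r.isEmpty = false := by simp [hr]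
      simp only [hie, Bool.false_eq_true, if_false, if_neg hr]
      rw [ih (by simp) (by simp_all)]
      simp
  | case6 run c rest h1 h2 h3 ih =>
    intro hrun hcs
    have hcdom : pvDomChar c = true := by simp_all
    have hgood : pvGood c = true := by
      simp [pvGood, hcdom, h1, h2, h3]
    rw [ih (by
        intro d hd
        rcases List.mem_append.mp hd with hd | hd
        · exact hrun d hd
        · simp at hd; subst hd; exact hgood)
      (by simp_all)]
    rw [List.append_assoc, List.singleton_append]

-- ===== VERDICT (by name: the statement is the Claim_ definition above) =====
theorem normalize_long_tokens_py_spec : Claim_equal_normalize_long_tokens_py := by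
  intro text hdom
  show _ = _
  unfold normalize_long_tokens_py normalize_long_tokens_py_alt
  rw [pv_splitlines_eq, pv_scanB_eq [] text.toList (by simp) hdom]
  rfl
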